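-- pv_equiv track=rewrite | github.com/0ndreu/Grok | ArraySum.py | get_sum_arr
-- ===== SOURCE A (Python) =====
-- def get_sum_arr(arr):
--     if len(arr) == 3:
--         return 0
--     else:
--         newarr = []
--         for i in range(len(arr)):
--             newarr.append(arr[i])
--         newarr.pop(0)
--         return arr[0] + get_sum_arr(newarr)
-- ===== SOURCE B (Python) =====
-- def get_sum_arr(arr):
--     arr = list(arr)
--     total = 0
--     while len(arr) != 3:
--         total += arr[0]
--         arr.pop(0)
--     return total
-- ===== Notes on version B (the rewrite author's own statement) =====
-- stated objective: faster
-- what changed: Replaces the recursion (which rebuilds a full copy of the list at every level and recurses once per element) with a single iterative accumulator loop over one local copy, avoiding the per-level O(n) copy and the recursion depth limit.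
import Mathlib
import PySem

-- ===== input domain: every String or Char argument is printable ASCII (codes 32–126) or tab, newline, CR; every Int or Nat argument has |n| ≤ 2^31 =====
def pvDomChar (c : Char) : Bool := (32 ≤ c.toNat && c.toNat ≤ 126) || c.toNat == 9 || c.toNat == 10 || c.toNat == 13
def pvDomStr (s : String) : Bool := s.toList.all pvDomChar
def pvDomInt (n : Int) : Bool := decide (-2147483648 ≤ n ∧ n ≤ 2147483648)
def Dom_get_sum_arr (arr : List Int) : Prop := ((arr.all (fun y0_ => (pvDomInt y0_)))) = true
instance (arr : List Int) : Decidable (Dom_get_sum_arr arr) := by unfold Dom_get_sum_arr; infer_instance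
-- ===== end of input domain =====

-- B replaces A's recursion (with a fresh per-level list copy) by one iterative
-- accumulator loop over a single local copy; same values on lists of length >= 3.


-- ===== PORT A =====
-- A: if len == 3 return 0, else copy the list, pop the head of the copy,
-- and return arr[0] + recursive call on the copy.  The [] case is unreachable
-- under Pre_ (in Python, arr[0] on the emptied list raises IndexError there).
def get_sum_arr (arr : List Int) : Int :=
  if arr.length == 3 then 0
  else
    match arr with
    | [] => 0            -- Python raises IndexError here; excluded by Pre_
    | x :: newarr => x + get_sum_arr newarr

-- ===== PORT B =====
-- B: iterative loop: while len != 3, add the front element to total and pop it.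
def getSumLoop (arr : List Int) (total : Int) : Int :=
  if arr.length == 3 then total
  else
    match arr with
    | [] => total        -- Python raises IndexError here; excluded by Pre_
    | x :: rest => getSumLoop rest (total + x)

def get_sum_arr_alt (arr : List Int) : Int := getSumLoop arr 0

-- ===== PRECONDITION & SPEC =====
-- Pre_ excludes lists of length < 3, on which the Python A (and B) raises IndexError.
def Pre_get_sum_arr (arr : List Int) : Prop := 3 ≤ arr.length
instance (arr : List Int) : Decidable (Pre_get_sum_arr arr) := by unfold Pre_get_sum_arr; infer_instance
def pvWitness_get_sum_arr : List Int := [1, 2, 3, 4]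

def Spec_get_sum_arr (arr : List Int) (out : Int) : Prop := out = get_sum_arr_alt arr
instance (arr : List Int) (out : Int) : Decidable (Spec_get_sum_arr arr out) := by unfold Spec_get_sum_arr; infer_instance

-- ===== CLAIM (what is proved, stated in full; the proofs are below) =====
def Claim_equal_get_sum_arr : Prop := ∀ (arr : List Int), Dom_get_sum_arr arr → Pre_get_sum_arr arr → Spec_get_sum_arr arr (get_sum_arr arr)

-- ===== LEMMAS AND PROOFS =====
theorem getSumLoop_eq (arr : List Int) (total : Int) :
    getSumLoop arr total = total + get_sum_arr arr := by
  induction arr generalizing total with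
  | nil => simp [getSumLoop, get_sum_arr]
  | cons x rest ih =>
    by_cases h : (x :: rest).length = 3
    · simp [getSumLoop, get_sum_arr, h]
    · rw [getSumLoop, get_sum_arr, if_neg (by simpa using h), if_neg (by simpa using h), ih]
      ring

-- ===== VERDICT (by name: the statement is the Claim_ definition above) =====
theorem get_sum_arr_spec : Claim_equal_get_sum_arr := by
  intro arr _ _
  unfold Spec_get_sum_arr get_sum_arr_alt
  rw [getSumLoop_eq]
  ring
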